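-- pv_equiv track=rewrite | github.com/BrayanSolanoF/EjerciciosPython | Ejercicios de quiz&examen/kevin-alanis-exam1.py | diferencia1
-- ===== SOURCE A (Python) =====
-- def diferencia1(num1, num2):
--     if num1==0:#Caso base
--         return []
--     elif num1%10!=num2%10:
--         if num2!=0:
--             return diferencia1(num1//10, num2//10)+[num1%10]
--         else:
--             return diferencia1(num1//10, num2//10)+[num1%10]
--     else:
--         return diferencia1(num1//10, num2//10)
-- ===== SOURCE B (Python) =====
-- def diferencia1(num1, num2):
--     res = []
--     while num1 != 0:
--         d1 = num1 % 10
--         d2 = num2 % 10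
--         if d1 != d2:
--             res.append(d1)
--         num1 //= 10
--         num2 //= 10
--     res.reverse()
--     return res
-- ===== Notes on version B (the rewrite author's own statement) =====
-- stated objective: simpler
-- what changed: Replaces the recursive prepend-based definition (with a redundant num2 branch) by a single iterative while-loop that accumulates differing digits least-significant-first and reverses once at the end.
import Mathlib
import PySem

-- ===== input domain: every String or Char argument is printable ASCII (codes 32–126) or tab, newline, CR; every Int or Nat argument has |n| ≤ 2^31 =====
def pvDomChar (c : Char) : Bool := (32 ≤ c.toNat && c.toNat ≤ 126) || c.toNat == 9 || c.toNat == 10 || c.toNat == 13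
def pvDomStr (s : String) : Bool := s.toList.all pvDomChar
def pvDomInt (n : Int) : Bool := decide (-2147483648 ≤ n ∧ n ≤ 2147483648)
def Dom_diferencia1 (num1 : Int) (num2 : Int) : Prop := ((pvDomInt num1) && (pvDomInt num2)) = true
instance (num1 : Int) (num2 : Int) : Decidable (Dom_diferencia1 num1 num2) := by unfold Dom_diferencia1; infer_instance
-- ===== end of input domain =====

-- B replaces the recursion by an iterative accumulate-then-reverse loop (objective: simpler).

-- termination measure helper for both ports (cited in decreasing_by)
theorem pvFloordiv10_natAbs_lt (n : Int) (h : 0 < n) :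
    (PySem.Int.floordiv n 10).natAbs < n.natAbs := by
  rw [PySem.Int.floordiv_eq_ediv_of_pos (by omega)]
  omega

-- ===== PORT A =====
-- 'if num1 < 0 then []' only makes the Python recursion (which never terminates there) total; Pre_ excludes it.
def diferencia1 (num1 : Int) (num2 : Int) : List Int :=
  if num1 = 0 then []
  else if _h : num1 < 0 then []
  else if PySem.Int.mod num1 10 ≠ PySem.Int.mod num2 10 then
    if num2 ≠ 0 then
      diferencia1 (PySem.Int.floordiv num1 10) (PySem.Int.floordiv num2 10) ++ [PySem.Int.mod num1 10]
    else
      diferencia1 (PySem.Int.floordiv num1 10) (PySem.Int.floordiv num2 10) ++ [PySem.Int.mod num1 10]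
  else
    diferencia1 (PySem.Int.floordiv num1 10) (PySem.Int.floordiv num2 10)
termination_by num1.natAbs
decreasing_by all_goals exact pvFloordiv10_natAbs_lt num1 (by omega)

-- ===== PORT B =====
-- the while-loop: state (num1, num2, res); same totalising guard as above
def diferencia1Loop (num1 : Int) (num2 : Int) (res : List Int) : List Int :=
  if num1 = 0 then res
  else if _h : num1 < 0 then res
  else
    diferencia1Loop (PySem.Int.floordiv num1 10) (PySem.Int.floordiv num2 10)
      (if PySem.Int.mod num1 10 ≠ PySem.Int.mod num2 10 then res ++ [PySem.Int.mod num1 10] else res)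
termination_by num1.natAbs
decreasing_by exact pvFloordiv10_natAbs_lt num1 (by omega)

def diferencia1_alt (num1 : Int) (num2 : Int) : List Int :=
  (diferencia1Loop num1 num2 []).reverse

-- ===== PRECONDITION & SPEC =====
-- Pre_ excludes negative num1, on which the Python A recurses forever (RecursionError) and B loops forever.
def Pre_diferencia1 (num1 : Int) (num2 : Int) : Prop := 0 ≤ num1
instance (num1 : Int) (num2 : Int) : Decidable (Pre_diferencia1 num1 num2) := by unfold Pre_diferencia1; infer_instance
def pvWitness_diferencia1 : Int × Int := (123, 103)

def Spec_diferencia1 (num1 : Int) (num2 : Int) (out : List Int) : Prop := out = diferencia1_alt num1 num2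
instance (num1 : Int) (num2 : Int) (out : List Int) : Decidable (Spec_diferencia1 num1 num2 out) := by unfold Spec_diferencia1; infer_instance

-- ===== CLAIM (what is proved, stated in full; the proofs are below) =====
def Claim_equal_diferencia1 : Prop := ∀ (num1 : Int) (num2 : Int), Dom_diferencia1 num1 num2 → Pre_diferencia1 num1 num2 → Spec_diferencia1 num1 num2 (diferencia1 num1 num2)

-- ===== LEMMAS AND PROOFS =====

theorem diferencia1Loop_acc (num1 num2 : Int) (res : List Int) :
    diferencia1Loop num1 num2 res = res ++ diferencia1Loop num1 num2 [] := by
  generalize hk : num1.natAbs = k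
  induction k using Nat.strong_induction_on generalizing num1 num2 res with
  | _ k ih =>
    conv_lhs => rw [diferencia1Loop]
    conv_rhs => rw [diferencia1Loop]
    by_cases h0 : num1 = 0
    · simp [h0]
    by_cases hn : num1 < 0
    · simp [h0, hn]
    rw [if_neg h0, if_neg h0, dif_neg hn, dif_neg hn]
    have hlt : (PySem.Int.floordiv num1 10).natAbs < k :=
      hk ▸ pvFloordiv10_natAbs_lt num1 (by omega)
    by_cases hd : PySem.Int.mod num1 10 ≠ PySem.Int.mod num2 10
    · rw [if_pos hd, if_pos hd,
        ih _ hlt _ _ _ rfl, ih _ hlt _ _ ([] ++ [PySem.Int.mod num1 10]) rfl]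
      simp
    · rw [if_neg hd, if_neg hd, ih _ hlt _ _ res rfl]

theorem diferencia1_eq_loop_reverse (num1 num2 : Int) :
    diferencia1 num1 num2 = (diferencia1Loop num1 num2 []).reverse := by
  induction num1, num2 using diferencia1.induct with
  | case1 n2 => simp [diferencia1, diferencia1Loop]
  | case2 n1 n2 h h' => rw [diferencia1, diferencia1Loop]; simp [h, h']
  | case3 n1 n2 h h' hd hn ih =>
    rw [diferencia1, diferencia1Loop, if_neg h, if_neg h, dif_neg h', dif_neg h',
      if_pos hd, if_pos hd, if_pos hn, diferencia1Loop_acc, ih]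
    simp
  | case4 n1 n2 h h' hd hn ih =>
    rw [diferencia1, diferencia1Loop, if_neg h, if_neg h, dif_neg h', dif_neg h',
      if_pos hd, if_pos hd, if_neg hn, diferencia1Loop_acc, ih]
    simp
  | case5 n1 n2 h h' hd ih =>
    rw [diferencia1, diferencia1Loop, if_neg h, if_neg h, dif_neg h', dif_neg h',
      if_neg hd, if_neg hd, ih]

-- ===== VERDICT (by name: the statement is the Claim_ definition above) =====
theorem diferencia1_spec : Claim_equal_diferencia1 := by
  intro num1 num2 _ _
  unfold Spec_diferencia1 diferencia1_alt
  exact diferencia1_eq_loop_reverse num1 num2
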